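-- pv_equiv track=rewrite | github.com/madhumini-gunaratne/teacher-chatbot | app.py | is_initial_greeting
-- ===== SOURCE A (Python) =====
-- def is_initial_greeting(message):
--     """
--     Detect if message is a simple greeting/small talk that shouldn't retrieve context.
--     Returns True if this looks like a greeting that should get a simple response.
--     """
--     # Short messages that are greetings or casual chat
--     greetings = [
--         "hi", "hello", "hey", "greetings", "what's up", "sup", "yo", "yoo", "yooo",
--         "how are you", "how are you doing", "how's it going", "whats up", "wassup",
--         "good morning", "good afternoon", "good evening", "hey there",
--         "what up", "heya", "hiya", "hallo", "howdy", "g'day",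
--         "thanks", "thank you", "ty", "thx", "ok", "okay", "k", "kk",
--         "bye", "goodbye", "see you", "cya", "ttyl"
--     ]
--
--     msg_lower = message.lower().strip()
--
--     # Exact match or starts with greeting (for longer greetings)
--     is_greeting = any(msg_lower == g or (msg_lower.startswith(g) and len(msg_lower) <= len(g) + 2) for g in greetings)
--
--     return is_greeting
-- ===== SOURCE B (Python) =====
-- _GREETINGS = frozenset(
--     "hi,hello,hey,greetings,what's up,sup,yo,yoo,yooo,how are you,how are you doing,how's it going,whats up,wassup,good morning,good afternoon,good evening,hey there,what up,heya,hiya,hallo,howdy,g'day,thanks,thank you,ty,thx,ok,okay,k,kk,bye,goodbye,see you,cya,ttyl".split(",")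
-- )
--
--
-- def is_initial_greeting(message):
--     """
--     Detect if message is a simple greeting/small talk that shouldn't retrieve context.
--     Returns True if this looks like a greeting that should get a simple response.
--     """
--     # A match means: the message, with at most 2 trailing characters peeled off,
--     # is exactly a known greeting. So peel the last character up to twice.
--     s = message.lower().strip()
--     for _ in range(3):
--         if s in _GREETINGS:
--             return True
--         s = s[:-1]
--     return False
-- ===== Notes on version B (the rewrite author's own statement) =====
-- stated objective: simpler
-- what changed: Instead of scanning the whole greeting list testing equality/startswith per greeting, B builds a frozenset once from a CSV literal and loops at most three times, testing set membership of the lowered/stripped message and peeling one trailing character per iteration.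
import Mathlib
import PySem

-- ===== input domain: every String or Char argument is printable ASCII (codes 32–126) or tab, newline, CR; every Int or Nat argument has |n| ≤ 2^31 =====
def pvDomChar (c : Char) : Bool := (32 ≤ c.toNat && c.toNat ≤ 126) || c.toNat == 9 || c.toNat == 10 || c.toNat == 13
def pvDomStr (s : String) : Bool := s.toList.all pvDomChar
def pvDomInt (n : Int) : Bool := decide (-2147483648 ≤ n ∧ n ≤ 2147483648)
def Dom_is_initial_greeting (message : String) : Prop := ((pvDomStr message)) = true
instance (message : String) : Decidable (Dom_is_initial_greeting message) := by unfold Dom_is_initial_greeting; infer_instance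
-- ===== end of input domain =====

-- B replaces A's scan over the greeting list (per-greeting equality/startswith tests) by a set
-- built from one CSV literal and a loop peeling the last character at most twice — simpler.

-- ===== PORT A =====
def pvGreetingsA : List String :=
  ["hi", "hello", "hey", "greetings", "what's up", "sup", "yo", "yoo", "yooo",
   "how are you", "how are you doing", "how's it going", "whats up", "wassup",
   "good morning", "good afternoon", "good evening", "hey there",
   "what up", "heya", "hiya", "hallo", "howdy", "g'day",
   "thanks", "thank you", "ty", "thx", "ok", "okay", "k", "kk",
   "bye", "goodbye", "see you", "cya", "ttyl"]

def is_initial_greeting (message : String) : Bool :=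
  let msg_lower := PySem.Str.strip (PySem.Str.lower message)
  pvGreetingsA.any (fun g =>
    msg_lower == g ||
    (PySem.Str.startswith msg_lower g &&
      decide (PySem.Str.len msg_lower ≤ PySem.Str.len g + 2)))

-- ===== PORT B =====
-- frozenset("…".split(","))
def pvGreetingSet : PySem.Set String :=
  PySem.Set.ofList ((PySem.Str.split?
    "hi,hello,hey,greetings,what's up,sup,yo,yoo,yooo,how are you,how are you doing,how's it going,whats up,wassup,good morning,good afternoon,good evening,hey there,what up,heya,hiya,hallo,howdy,g'day,thanks,thank you,ty,thx,ok,okay,k,kk,bye,goodbye,see you,cya,ttyl"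
    ",").getD [])  -- split? is none only for sep = ""; the separator here is ","

-- 'for _ in range(3): if s in set: return True; s = s[:-1]'
def pvPeelLoop : Nat → String → Bool
  | 0, _ => false
  | k + 1, s =>
    if PySem.Set.contains pvGreetingSet s then true
    else pvPeelLoop k (PySem.Str.slice s none (some (-1)))

def is_initial_greeting_alt (message : String) : Bool :=
  pvPeelLoop 3 (PySem.Str.strip (PySem.Str.lower message))

-- ===== PRECONDITION & SPEC =====
def Spec_is_initial_greeting (message : String) (out : Bool) : Prop := out = is_initial_greeting_alt message
instance (message : String) (out : Bool) : Decidable (Spec_is_initial_greeting message out) := by unfold Spec_is_initial_greeting; infer_instance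

-- ===== CLAIM (what is proved, stated in full; the proofs are below) =====
def Claim_equal_is_initial_greeting : Prop := ∀ (message : String), Dom_is_initial_greeting message → Spec_is_initial_greeting message (is_initial_greeting message)

-- ===== LEMMAS AND PROOFS =====

-- B's CSV split produces exactly A's greeting list (the literals are pairwise distinct)
set_option maxRecDepth 40000 in
theorem pvSet_eq : pvGreetingSet = pvGreetingsA := by decide

-- A's per-greeting test, as a proposition on the character lists
theorem pv_gtest_iff (s g : String) :
    (s == g ||
      (PySem.Str.startswith s g && decide (PySem.Str.len s ≤ PySem.Str.len g + 2))) = true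
    ↔ (g.toList <+: s.toList ∧ s.toList.length ≤ g.toList.length + 2) := by
  simp only [Bool.or_eq_true, Bool.and_eq_true, beq_iff_eq, decide_eq_true_eq,
    PySem.Str.startswith_eq, PySem.Chars.startswith_iff, PySem.Str.len_eq]
  constructor
  · rintro (rfl | ⟨hp, hl⟩)
    · exact ⟨List.prefix_refl _, by omega⟩
    · exact ⟨hp, by exact_mod_cast hl⟩
  · rintro ⟨hp, hl⟩
    exact Or.inr ⟨hp, by exact_mod_cast hl⟩

-- membership of a string in the greeting list, via toList
theorem pv_contains_iff (t : String) :
    PySem.Set.contains pvGreetingSet t = true ↔ ∃ g ∈ pvGreetingsA, t.toList = g.toList := by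
  rw [pvSet_eq, PySem.Set.contains_iff]
  constructor
  · intro h; exact ⟨t, h, rfl⟩
  · rintro ⟨g, hg, ht⟩
    have : t = g := by rw [String.ext_iff]; exact ht
    rw [this]; exact hg

-- s[:-1] peels the last character
theorem pv_peel_toList (s : String) :
    (PySem.Str.slice s none (some (-1))).toList = s.toList.dropLast := by
  rw [PySem.Str.toList_slice, PySem.Chars.slice_eq_listSlice]
  exact PySem.List.slice_to_neg_one _

-- the two bodies agree on every string
theorem pv_bodies_eq (s : String) :
    pvGreetingsA.any (fun g =>
      s == g ||
      (PySem.Str.startswith s g && decide (PySem.Str.len s ≤ PySem.Str.len g + 2)))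
    = pvPeelLoop 3 s := by
  rw [Bool.eq_iff_iff, List.any_eq_true]
  -- name the three strings the loop inspects
  set s1 := PySem.Str.slice s none (some (-1)) with hs1
  set s2 := PySem.Str.slice s1 none (some (-1)) with hs2
  have h1 : s1.toList = s.toList.take (s.toList.length - 1) := by
    rw [hs1, pv_peel_toList, List.dropLast_eq_take]
  have h2 : s2.toList = s.toList.take (s.toList.length - 2) := by
    rw [hs2, pv_peel_toList, h1, List.dropLast_eq_take, List.length_take, List.take_take]
    congr 1
    omega
  have hloop : pvPeelLoop 3 s
      = (PySem.Set.contains pvGreetingSet s || (PySem.Set.contains pvGreetingSet s1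
          || PySem.Set.contains pvGreetingSet s2)) := by
    simp only [pvPeelLoop, ← hs1, ← hs2]
    by_cases c0 : PySem.Set.contains pvGreetingSet s = true <;>
      by_cases c1 : PySem.Set.contains pvGreetingSet s1 = true <;>
      by_cases c2 : PySem.Set.contains pvGreetingSet s2 = true <;>
      simp only [c0, c1, c2, Bool.not_eq_true] at * <;>
      simp
  rw [hloop]
  conv_rhs => rw [Bool.or_eq_true, Bool.or_eq_true]
  constructor
  · rintro ⟨g, hg, hcond⟩
    obtain ⟨hp, hl⟩ := (pv_gtest_iff s g).mp hcond
    have hgle : g.toList.length ≤ s.toList.length := hp.length_le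
    have htake : ∀ k, k = g.toList.length → s.toList.take k = g.toList := by
      rintro _ rfl
      exact (List.prefix_iff_eq_take.mp hp).symm
    -- d = extra trailing characters, 0 ≤ d ≤ 2
    rcases Nat.lt_or_ge g.toList.length s.toList.length with hlt | hge
    · rcases Nat.lt_or_ge (g.toList.length + 1) s.toList.length with hlt2 | hge2
      · -- d = 2
        refine Or.inr (Or.inr ((pv_contains_iff s2).mpr ⟨g, hg, ?_⟩))
        rw [h2, htake _ (by omega)]
      · -- d = 1
        refine Or.inr (Or.inl ((pv_contains_iff s1).mpr ⟨g, hg, ?_⟩))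
        rw [h1, htake _ (by omega)]
    · -- d = 0
      refine Or.inl ((pv_contains_iff s).mpr ⟨g, hg, ?_⟩)
      rw [← List.take_length (l := s.toList), htake _ (by omega)]
  · intro h
    have key : ∀ (t : String) (d : Nat), d ≤ 2 →
        t.toList = s.toList.take (s.toList.length - d) →
        PySem.Set.contains pvGreetingSet t = true →
        ∃ g ∈ pvGreetingsA,
          (s == g ||
            (PySem.Str.startswith s g && decide (PySem.Str.len s ≤ PySem.Str.len g + 2))) = true := by
      rintro t d hd ht hc
      obtain ⟨g, hg, hgt⟩ := (pv_contains_iff t).mp hc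
      have hgl : g.toList = s.toList.take (s.toList.length - d) := by rw [← hgt, ht]
      refine ⟨g, hg, (pv_gtest_iff s g).mpr ⟨?_, ?_⟩⟩
      · rw [hgl]; exact List.take_prefix _ _
      · have : g.toList.length = min (s.toList.length - d) s.toList.length := by
          rw [hgl, List.length_take]
        omega
    rcases h with hc0 | hc1 | hc2
    · exact key s 0 (by omega) (by simp) hc0
    · exact key s1 1 (by omega) h1 hc1
    · exact key s2 2 (by omega) h2 hc2

-- ===== VERDICT (by name: the statement is the Claim_ definition above) =====
theorem is_initial_greeting_spec : Claim_equal_is_initial_greeting := by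
  intro message _
  unfold Spec_is_initial_greeting is_initial_greeting is_initial_greeting_alt
  exact pv_bodies_eq (PySem.Str.strip (PySem.Str.lower message))
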